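-- pv_equiv track=rewrite | github.com/PSnik-Kostiantyn/SplitBrainDetector | app/model/isDeadCluster.py | isClusterDead
-- ===== SOURCE A (Python) =====
-- def dfs(node, graph, visited, component):
--     visited[node] = True
--     component.append(node)
--     for neighbor, connected in enumerate(graph[node]):
--         if connected and not visited[neighbor]:
--             dfs(neighbor, graph, visited, component)
--
-- def find_islands(matrix):
--     n = len(matrix)
--     visited = [False] * n
--     islands = []
--
--     for node in range(n):
--         if not visited[node]:
--             component = []
--             dfs(node, matrix, visited, component)
--             islands.append(component)
--     return islands
--
-- def isClusterDead(nodes, matrix):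
--     if all(all(cell == 0 for cell in row) for row in matrix):
--         return True
--
--     required_types = set(node[0].lower() for node in nodes)
--
--     islands = find_islands(matrix)
--
--     for island in islands:
--         types_in_island = set()
--         for node_index in island:
--             node_type = nodes[node_index][0].lower()
--             types_in_island.add(node_type)
--
--         if required_types.issubset(types_in_island):
--             return False
--
--     return True
-- ===== SOURCE B (Python) =====
-- def isClusterDead(nodes, matrix):
--     if all(cell == 0 for row in matrix for cell in row):
--         return True
--
--     required = set(node[0].lower() for node in nodes)
--
--     n = len(matrix)
--     visited = [False] * n
--     for start in range(n):
--         if visited[start]: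
--             continue
--         island = []
--         stack = [start]
--         while stack:
--             node = stack.pop()
--             if visited[node]:
--                 continue
--             visited[node] = True
--             island.append(node)
--             for neighbor, cell in reversed(list(enumerate(matrix[node]))):
--                 if cell:
--                     stack.append(neighbor)
--         types = set(nodes[i][0].lower() for i in island)
--         if required.issubset(types):
--             return False
--     return True
-- ===== Notes on version B (the rewrite author's own statement) =====
-- stated objective: alternative
-- what changed: Replaces the recursive dfs helper and the separately built islands list with a single fused pass: for each unvisited start node an explicit-stack iterative traversal (pushing truthy neighbors in reverse, marking on pop) collects the island, whose type set is checked immediately with an early return, so no recursion, no dfs/find_islands helpers and no islands list exist.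
-- outside the precondition, e.g. on isClusterDead(['a'], [[1, 0], [0, 0]]): A returns False, B returns False
import Mathlib
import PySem

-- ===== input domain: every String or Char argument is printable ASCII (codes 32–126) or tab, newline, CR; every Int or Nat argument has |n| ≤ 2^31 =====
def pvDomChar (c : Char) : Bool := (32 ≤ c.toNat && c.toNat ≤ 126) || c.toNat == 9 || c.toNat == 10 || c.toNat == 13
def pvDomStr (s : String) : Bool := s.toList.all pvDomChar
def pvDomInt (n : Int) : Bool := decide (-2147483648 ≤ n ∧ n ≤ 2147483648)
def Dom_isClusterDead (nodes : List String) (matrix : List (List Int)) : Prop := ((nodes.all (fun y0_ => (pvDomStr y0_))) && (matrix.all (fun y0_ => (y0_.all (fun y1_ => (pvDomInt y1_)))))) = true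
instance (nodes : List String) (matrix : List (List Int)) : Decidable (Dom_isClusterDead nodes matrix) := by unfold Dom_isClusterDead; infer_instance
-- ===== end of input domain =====

-- B replaces the recursive dfs/find_islands pair by one fused pass with an explicit-stack
-- traversal and an early-return per island (objective: alternative decomposition, same cost).
-- Node indices produced by range/enumerate are always nonnegative, so they are carried as Nat;
-- visited[i] is read as getD i true (out-of-range reads never happen inside Pre_).

-- shared helper: node[0].lower(), as a list of chars (take 1 of the empty string never happens inside Pre_)
def pvFirstLower (s : String) : List Char := PySem.Chars.lower (s.toList.take 1)

-- ===== PORT A =====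
-- dfs, with fuel = recursion depth; matrix.length + 1 fuel is always enough (each level marks a new node)
def dfsA (graph : List (List Int)) : Nat → Nat → List Bool × List Nat → List Bool × List Nat
  | 0, _, s => s
  | f + 1, node, s =>
    ((graph.getD node []).zipIdx).foldl
      (fun t p => if p.1 != 0 && !(t.1.getD p.2 true) then dfsA graph f p.2 t else t)
      (s.1.set node true, s.2 ++ [node])

def findIslandsA (matrix : List (List Int)) : List (List Nat) :=
  ((List.range matrix.length).foldl
    (fun st node =>
      if !(st.1.getD node true) then
        let r := dfsA matrix (matrix.length + 1) node (st.1, [])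
        (r.1, st.2 ++ [r.2])
      else st)
    (List.replicate matrix.length false, [])).2

def islandTypes (nodes : List String) (island : List Nat) : PySem.Set (List Char) :=
  island.foldl (fun t i => PySem.Set.add t (pvFirstLower (nodes.getD i ""))) PySem.Set.empty

def isClusterDead (nodes : List String) (matrix : List (List Int)) : Bool :=
  if matrix.all (fun row => row.all (fun c => c == 0)) then true
  else
    let required := PySem.Set.ofList (nodes.map pvFirstLower)
    !((findIslandsA matrix).any (fun island => PySem.Set.issubset required (islandTypes nodes island)))

-- ===== PORT B =====
-- termination helper for the stack loop: marking an unvisited node shrinks the count of False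
theorem pvCountSetLt (v : List Bool) (n : Nat) (h : v.getD n true = false) :
    (v.set n true).count false < v.count false := by
  induction v generalizing n with
  | nil => simp [List.getD] at h
  | cons b v ih =>
    cases n with
    | zero => simp_all
    | succ n =>
      have := ih n (by simpa [List.getD] using h)
      simp only [List.set, List.count_cons]
      omega

-- neighbors pushed for a node: the truthy columns of its row, in column order
def nbrsB (graph : List (List Int)) (node : Nat) : List Nat :=
  (graph.getD node []).zipIdx.filterMap (fun p => if p.1 != 0 then some p.2 else none)

-- while stack: pop (head = top), skip if visited, else mark, append to island, push truthy neighbors reversed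
def runB (graph : List (List Int)) : List Nat → List Bool → List Nat → List Bool × List Nat
  | [], v, isl => (v, isl)
  | node :: stack, v, isl =>
    if v.getD node true then runB graph stack v isl
    else runB graph (nbrsB graph node ++ stack) (v.set node true) (isl ++ [node])
  termination_by stack v _ => (v.count false, stack.length)
  decreasing_by
  · exact Prod.Lex.right _ (Nat.lt_succ_self _)
  · exact Prod.Lex.left _ _ (pvCountSetLt v node (by simpa using ‹¬ v.getD node true = true›))

-- the fused outer loop: per unvisited start, traverse, check the island's types, early return
def goB (nodes : List String) (graph : List (List Int)) (required : PySem.Set (List Char)) :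
    List Nat → List Bool → Bool
  | [], _ => true
  | s :: rest, v =>
    if v.getD s true then goB nodes graph required rest v
    else
      let r := runB graph [s] v []
      let types := PySem.Set.ofList (r.2.map (fun i => pvFirstLower (nodes.getD i "")))
      if PySem.Set.issubset required types then false else goB nodes graph required rest r.1

def isClusterDead_alt (nodes : List String) (matrix : List (List Int)) : Bool :=
  if (matrix.flatMap (fun row => row)).all (fun c => c == 0) then true
  else
    goB nodes matrix (PySem.Set.ofList (nodes.map pvFirstLower))
      (List.range matrix.length) (List.replicate matrix.length false)

-- ===== PRECONDITION & SPEC =====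
-- Pre_ excludes exactly where Python A raises: outside the all-zero shortcut, an empty node
-- string (IndexError on node[0]), a truthy cell in column ≥ len(matrix) (IndexError on
-- visited[neighbor]), or fewer nodes than matrix rows (IndexError on nodes[node_index]) —
-- in the last case A can still return False when an earlier island already covers all types;
-- B returns the same value there (see the cite in claim.json).
def Pre_isClusterDead (nodes : List String) (matrix : List (List Int)) : Prop :=
  (∀ row ∈ matrix, ∀ c ∈ row, c = 0) ∨
  ((∀ s ∈ nodes, s ≠ "") ∧ matrix.length ≤ nodes.length ∧
    ∀ row ∈ matrix, ∀ c ∈ row.drop matrix.length, c = 0)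
instance (nodes : List String) (matrix : List (List Int)) : Decidable (Pre_isClusterDead nodes matrix) := by
  unfold Pre_isClusterDead; infer_instance

def pvWitness_isClusterDead : List String × List (List Int) :=
  (["a", "b"], [[0, 1], [1, 0]])

def Spec_isClusterDead (nodes : List String) (matrix : List (List Int)) (out : Bool) : Prop := out = isClusterDead_alt nodes matrix
instance (nodes : List String) (matrix : List (List Int)) (out : Bool) : Decidable (Spec_isClusterDead nodes matrix out) := by unfold Spec_isClusterDead; infer_instance

-- ===== CLAIM (what is proved, stated in full; the proofs are below) =====
def Claim_equal_isClusterDead : Prop := ∀ (nodes : List String) (matrix : List (List Int)), Dom_isClusterDead nodes matrix → Pre_isClusterDead nodes matrix → Spec_isClusterDead nodes matrix (isClusterDead nodes matrix)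

-- ===== LEMMAS AND PROOFS =====

-- A's inner neighbor fold, restated over a plain list of candidate indices
def afold (graph : List (List Int)) (f : Nat) (ys : List Nat) (s : List Bool × List Nat) :
    List Bool × List Nat :=
  ys.foldl (fun t i => if !(t.1.getD i true) then dfsA graph f i t else t) s

-- recursive restatement of find_islands' accumulating fold
def recA (graph : List (List Int)) : List Nat → List Bool → List (List Nat)
  | [], _ => []
  | s :: rest, v =>
    if !(v.getD s true) then
      let r := dfsA graph (graph.length + 1) s (v, [])
      r.2 :: recA graph rest r.1
    else recA graph rest v

theorem count_set_le (v : List Bool) (n : Nat) :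
    (v.set n true).count false ≤ v.count false := by
  induction v generalizing n with
  | nil => simp
  | cons b v ih =>
    cases n with
    | zero => cases b <;> simp
    | succ n => have := ih n; simp only [List.set, List.count_cons]; omega

theorem dfsA_count_le (graph : List (List Int)) (f : Nat) :
    ∀ (node : Nat) (s : List Bool × List Nat),
      ((dfsA graph f node s).1.count false) ≤ s.1.count false := by
  induction f with
  | zero => intro node s; simp [dfsA]
  | succ f ih =>
    intro node s
    simp only [dfsA]
    have key : ∀ (l : List (Int × Nat)) (t : List Bool × List Nat),
        ((l.foldl (fun t p => if p.1 != 0 && !(t.1.getD p.2 true) then dfsA graph f p.2 t else t) t).1.count false)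
          ≤ t.1.count false := by
      intro l
      induction l with
      | nil => intro t; simp
      | cons p l ihl =>
        intro t
        simp only [List.foldl_cons]
        split
        · exact le_trans (ihl _) (ih _ _)
        · exact ihl _
    exact le_trans (key _ _) (count_set_le _ _)

theorem afold_count_le (graph : List (List Int)) (f : Nat) (ys : List Nat)
    (s : List Bool × List Nat) : ((afold graph f ys s).1.count false) ≤ s.1.count false := by
  induction ys generalizing s with
  | nil => simp [afold]
  | cons i ys ih =>
    simp only [afold, List.foldl_cons]
    split
    · exact le_trans (ih _) (dfsA_count_le _ _ _ _)
    · exact ih _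

-- A's fold over enumerate(row) with its combined guard = afold over the truthy column indices
theorem enumfold_eq_afold (graph : List (List Int)) (f : Nat) :
    ∀ (l : List (Int × Nat)) (s : List Bool × List Nat),
      l.foldl (fun t p => if p.1 != 0 && !(t.1.getD p.2 true) then dfsA graph f p.2 t else t) s
        = afold graph f (l.filterMap (fun p => if p.1 != 0 then some p.2 else none)) s := by
  intro l
  induction l with
  | nil => intro s; simp [afold]
  | cons p l ih =>
    intro s
    by_cases hp : (p.1 != 0) = true
    · simp only [List.foldl_cons, List.filterMap_cons, afold, hp, Bool.true_and]
      exact ih _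
    · have hp' : (p.1 != 0) = false := by simpa using hp
      simp only [List.foldl_cons, List.filterMap_cons, hp', Bool.false_and,
        if_neg (Bool.false_ne_true)]
      exact ih s

theorem dfsA_succ_eq (graph : List (List Int)) (f node : Nat) (s : List Bool × List Nat) :
    dfsA graph (f + 1) node s
      = afold graph f (nbrsB graph node) (s.1.set node true, s.2 ++ [node]) := by
  simp only [dfsA, nbrsB]
  exact enumfold_eq_afold graph f _ _

theorem count_pos_of_getD_false (v : List Bool) (n : Nat) (h : v.getD n true = false) :
    0 < v.count false :=
  lt_of_le_of_lt (Nat.zero_le _) (pvCountSetLt v n h)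

-- main simulation: the stack run of (pending ++ rest) equals running A's neighbor fold on
-- pending first, then continuing with rest (fuel f at least the number of unvisited nodes)
theorem runB_eq_afold (graph : List (List Int)) :
    ∀ (n : Nat) (v : List Bool) (ys : List Nat) (f : Nat) (isl rest : List Nat),
      v.count false ≤ n → v.count false ≤ f →
      runB graph (ys ++ rest) v isl
        = runB graph rest (afold graph f ys (v, isl)).1 (afold graph f ys (v, isl)).2 := by
  intro n
  induction n using Nat.strong_induction_on with
  | _ n IH =>
    intro v ys
    induction ys generalizing v with
    | nil => intro f isl rest _ _; simp [afold]
    | cons i ys ihy =>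
      intro f isl rest hn hf
      by_cases hv : v.getD i true = true
      · have h1 : runB graph ((i :: ys) ++ rest) v isl = runB graph (ys ++ rest) v isl := by
          rw [List.cons_append, runB, if_pos hv]
        have h2 : afold graph f (i :: ys) (v, isl) = afold graph f ys (v, isl) := by
          simp only [afold, List.foldl_cons]
          rw [if_neg (by rw [hv]; decide)]
        rw [h1, h2, ihy v f isl rest hn hf]
      · have hv' : v.getD i true = false := by simpa using hv
        have hpos : 0 < v.count false := count_pos_of_getD_false v i hv'
        obtain ⟨f', rfl⟩ : ∃ f', f = f' + 1 := ⟨f - 1, by omega⟩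
        have hlt : (v.set i true).count false < v.count false := pvCountSetLt v i hv'
        have h1 : runB graph ((i :: ys) ++ rest) v isl
            = runB graph (nbrsB graph i ++ (ys ++ rest)) (v.set i true) (isl ++ [i]) := by
          rw [List.cons_append, runB, if_neg (by rw [hv']; decide)]
        set s2 := afold graph f' (nbrsB graph i) (v.set i true, isl ++ [i]) with hs2
        have hc2 : s2.1.count false ≤ (v.set i true).count false := afold_count_le _ _ _ _
        have step1 : runB graph (nbrsB graph i ++ (ys ++ rest)) (v.set i true) (isl ++ [i])
            = runB graph (ys ++ rest) s2.1 s2.2 := by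
          have := IH (n - 1) (by omega) (v.set i true) (nbrsB graph i) f' (isl ++ [i])
            (ys ++ rest) (by omega) (by omega)
          simpa [hs2] using this
        have step2 : runB graph (ys ++ rest) s2.1 s2.2
            = runB graph rest (afold graph (f' + 1) ys (s2.1, s2.2)).1
                (afold graph (f' + 1) ys (s2.1, s2.2)).2 := by
          exact IH (n - 1) (by omega) s2.1 ys (f' + 1) s2.2 rest (by omega) (by omega)
        have hA : afold graph (f' + 1) (i :: ys) (v, isl)
            = afold graph (f' + 1) ys (s2.1, s2.2) := by
          simp only [afold, List.foldl_cons]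
          rw [if_pos (show (!(v.getD i true)) = true by rw [hv']; rfl)]
          rw [dfsA_succ_eq]
        rw [h1, step1, step2, hA]

-- find_islands' fold, with accumulator, equals recA
theorem findIslands_acc (matrix : List (List Int)) :
    ∀ (starts : List Nat) (v : List Bool) (acc : List (List Nat)),
      ((starts.foldl
        (fun st node =>
          if !(st.1.getD node true) then
            let r := dfsA matrix (matrix.length + 1) node (st.1, [])
            (r.1, st.2 ++ [r.2])
          else st) (v, acc)).2) = acc ++ recA matrix starts v := by
  intro starts
  induction starts with
  | nil => intro v acc; simp [recA]
  | cons s rest ih =>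
    intro v acc
    by_cases hv : v.getD s true = true
    · simp only [List.foldl_cons, recA]
      rw [if_neg (by rw [hv]; decide), if_neg (by rw [hv]; decide)]
      exact ih v acc
    · have hv' : v.getD s true = false := by simpa using hv
      simp only [List.foldl_cons, recA]
      rw [if_pos (show (!((v, acc).1.getD s true)) = true by
            rw [show ((v, acc).1 : List Bool) = v from rfl, hv']; rfl),
        if_pos (show (!(v.getD s true)) = true by rw [hv']; rfl)]
      rw [ih _ _]
      simp

theorem islandTypes_eq (nodes : List String) (island : List Nat) :
    islandTypes nodes island
      = PySem.Set.ofList (island.map (fun i => pvFirstLower (nodes.getD i ""))) := by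
  rw [← PySem.Set.update_nil_left, PySem.Set.update_map_eq_foldl_add]
  rfl

-- the fused loop equals the check-after scan over recA's islands
theorem goB_eq (nodes : List String) (matrix : List (List Int)) (req : PySem.Set (List Char)) :
    ∀ (starts : List Nat) (v : List Bool), v.count false ≤ matrix.length →
      goB nodes matrix req starts v
        = !((recA matrix starts v).any
            (fun island => PySem.Set.issubset req (islandTypes nodes island))) := by
  intro starts
  induction starts with
  | nil => intro v _; simp [goB, recA]
  | cons s rest ih =>
    intro v hv
    by_cases h : v.getD s true = true
    · simp only [goB, recA]
      rw [if_pos h, if_neg (by rw [h]; decide)]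
      exact ih v hv
    · have h' : v.getD s true = false := by simpa using h
      have hrun : runB matrix [s] v [] = dfsA matrix (matrix.length + 1) s (v, []) := by
        have h0 := runB_eq_afold matrix (v.count false) v [s] (matrix.length + 1) [] []
          (le_refl _) (by omega)
        have ha : afold matrix (matrix.length + 1) [s] (v, [])
            = dfsA matrix (matrix.length + 1) s (v, []) := by
          simp only [afold, List.foldl_cons, List.foldl_nil]
          rw [if_pos (show (!(v.getD s true)) = true by rw [h']; rfl)]
        rw [List.append_nil] at h0
        rw [h0, ha, runB]
      simp only [goB, recA]
      rw [if_neg h, if_pos (show (!(v.getD s true)) = true by rw [h']; rfl)]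
      simp only [hrun, List.any_cons, Bool.not_or]
      by_cases hsub : PySem.Set.issubset req
          (PySem.Set.ofList ((dfsA matrix (matrix.length + 1) s (v, [])).2.map
            (fun i => pvFirstLower (nodes.getD i "")))) = true
      · rw [if_pos hsub, islandTypes_eq, hsub]
        rfl
      · have hF : PySem.Set.issubset req
            (PySem.Set.ofList ((dfsA matrix (matrix.length + 1) s (v, [])).2.map
              (fun i => pvFirstLower (nodes.getD i "")))) = false :=
          Bool.eq_false_iff.mpr hsub
        have hc : (dfsA matrix (matrix.length + 1) s (v, [])).1.count false ≤ matrix.length :=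
          le_trans (dfsA_count_le _ _ _ _) hv
        rw [if_neg hsub, ih _ hc, islandTypes_eq, hF]
        rfl

theorem allzero_eq (matrix : List (List Int)) :
    (matrix.flatMap (fun row => row)).all (fun c => c == 0)
      = matrix.all (fun row => row.all (fun c => c == 0)) := by
  induction matrix with
  | nil => rfl
  | cons row rows ih => simp [List.flatMap_cons, List.all_append]

-- ===== VERDICT (by name: the statement is the Claim_ definition above) =====
theorem isClusterDead_spec : Claim_equal_isClusterDead := by
  intro nodes matrix _ _
  unfold Spec_isClusterDead isClusterDead isClusterDead_alt
  rw [allzero_eq]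
  split
  · rfl
  · rw [goB_eq nodes matrix _ (List.range matrix.length) (List.replicate matrix.length false)
      (by simp)]
    unfold findIslandsA
    rw [findIslands_acc]
    simp only [List.nil_append]
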